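-- pv_equiv track=rewrite | github.com/Belikov0/nlp_hmm | nlputils.py | cal_count
-- ===== SOURCE A (Python) =====
-- def cal_count(real_res, pred_res):
--     real_count = len(real_res)
--     pred_count = len(pred_res)
--     correct_count = 0
--
--     preal = [0]
--     ppred = [0]
--
--     for real_word in real_res:
--         preal.append(preal[-1]+len(real_word))
--     for pred_word in pred_res:
--         ppred.append(ppred[-1]+len(pred_word))
--
--     real_set = set(zip(ppred[:-1], ppred[1:]))
--     for word_indexes in zip(preal[:-1], preal[1:]):
--         if word_indexes in real_set:
--             correct_count += 1
--
--     return real_count, pred_count, correct_count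
-- ===== SOURCE B (Python) =====
-- def cal_count(real_res, pred_res):
--     def spans(words):
--         res = []
--         pos = 0
--         for w in words:
--             res.append((pos, pos + len(w)))
--             pos += len(w)
--         return res
--
--     rp = spans(real_res)
--     pp = spans(pred_res)
--     j = 0
--     correct = 0
--     for p in rp:
--         while j < len(pp) and pp[j] < p:
--             j += 1
--         if j < len(pp) and pp[j] == p:
--             correct += 1
--     return len(real_res), len(pred_res), correct
-- ===== Notes on version B (the rewrite author's own statement) =====
-- stated objective: alternative
-- what changed: Replaces the hash-set of predicted spans and per-span membership tests by a single two-pointer merge over the two sorted span lists, exploiting that cumulative boundaries are non-decreasing.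
import Mathlib
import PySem

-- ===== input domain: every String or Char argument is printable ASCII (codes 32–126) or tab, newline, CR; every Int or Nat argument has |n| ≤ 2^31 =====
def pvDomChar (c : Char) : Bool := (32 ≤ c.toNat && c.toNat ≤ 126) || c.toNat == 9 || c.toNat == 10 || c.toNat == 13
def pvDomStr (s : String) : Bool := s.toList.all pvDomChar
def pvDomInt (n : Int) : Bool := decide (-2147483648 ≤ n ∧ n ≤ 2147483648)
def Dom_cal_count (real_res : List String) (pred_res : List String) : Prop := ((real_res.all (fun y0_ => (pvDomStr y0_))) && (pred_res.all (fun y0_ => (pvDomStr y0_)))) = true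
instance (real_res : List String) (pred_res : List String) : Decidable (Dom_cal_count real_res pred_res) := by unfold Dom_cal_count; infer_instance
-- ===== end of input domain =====

-- B replaces A's hash-set membership tests by a two-pointer merge of the two sorted span lists (alternative decomposition, same asymptotic cost).

-- ===== PORT A =====
def cal_count (real_res : List String) (pred_res : List String) : Int × Int × Int :=
  let real_count : Int := real_res.length
  let pred_count : Int := pred_res.length
  let correct_count : Int := 0
  let preal : List Int :=
    real_res.foldl (fun acc w => acc ++ [PySem.List.pyGetD acc (-1) 0 + PySem.Str.len w]) [0]
  let ppred : List Int :=
    pred_res.foldl (fun acc w => acc ++ [PySem.List.pyGetD acc (-1) 0 + PySem.Str.len w]) [0]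
  let real_set : PySem.Set (Int × Int) :=
    PySem.Set.ofList ((PySem.List.slice ppred none (some (-1))).zip (PySem.List.slice ppred (some 1) none))
  let correct_count :=
    ((PySem.List.slice preal none (some (-1))).zip (PySem.List.slice preal (some 1) none)).foldl
      (fun c p => if PySem.Set.contains real_set p then c + 1 else c) correct_count
  (real_count, pred_count, correct_count)

-- ===== PORT B =====
-- spans helper of Source B: list of (start, end) pairs
def altSpans : List String → Int → List (Int × Int)
  | [], _ => []
  | w :: ws, pos => (pos, pos + PySem.Str.len w) :: altSpans ws (pos + PySem.Str.len w)

-- Python's lexicographic '<' on int pairs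
def pairLt (q p : Int × Int) : Bool := q.1 < p.1 || (q.1 == p.1 && q.2 < p.2)

-- Source B's inner while loop: advance j past pred spans that are < p (the suffix from j)
def altAdvance (p : Int × Int) : List (Int × Int) → List (Int × Int)
  | [] => []
  | q :: rest => if pairLt q p then altAdvance p rest else q :: rest

-- Source B's outer for loop over the real spans, carrying the pred-span suffix and the counter
def altLoop : List (Int × Int) → List (Int × Int) → Int → Int
  | [], _, c => c
  | p :: rp, pp, c =>
    let pp' := altAdvance p pp
    match pp' with
    | q :: _ => altLoop rp pp' (if q = p then c + 1 else c)
    | [] => altLoop rp pp' c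

def cal_count_alt (real_res : List String) (pred_res : List String) : Int × Int × Int :=
  let rp := altSpans real_res 0
  let pp := altSpans pred_res 0
  ((real_res.length : Int), (pred_res.length : Int), altLoop rp pp 0)

-- ===== PRECONDITION & SPEC =====
def Spec_cal_count (real_res : List String) (pred_res : List String) (out : Int × Int × Int) : Prop := out = cal_count_alt real_res pred_res
instance (real_res : List String) (pred_res : List String) (out : Int × Int × Int) : Decidable (Spec_cal_count real_res pred_res out) := by unfold Spec_cal_count; infer_instance

-- ===== CLAIM (what is proved, stated in full; the proofs are below) =====
def Claim_equal_cal_count : Prop := ∀ (real_res : List String) (pred_res : List String), Dom_cal_count real_res pred_res → Spec_cal_count real_res pred_res (cal_count real_res pred_res)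

-- ===== LEMMAS AND PROOFS =====

-- the lexicographic ≤ on int pairs, as a Prop
def lexLe (q p : Int × Int) : Prop := q.1 < p.1 ∨ (q.1 = p.1 ∧ q.2 ≤ p.2)

theorem pairLt_iff (q p : Int × Int) : pairLt q p = true ↔ ¬ lexLe p q := by
  simp [pairLt, lexLe]; omega

theorem lexLe_refl (p : Int × Int) : lexLe p p := by simp [lexLe]

theorem lexLe_antisymm {a b : Int × Int} (h1 : lexLe a b) (h2 : lexLe b a) : a = b := by
  simp [lexLe] at *
  have : a.1 = b.1 ∧ a.2 = b.2 := by omega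
  exact Prod.ext this.1 this.2

-- the cumulative boundary list A builds, in structural form
def bl : Int → List String → List Int
  | pos, [] => [pos]
  | pos, w :: ws => pos :: bl (pos + PySem.Str.len w) ws

theorem foldl_eq_bl (ws : List String) (a : List Int) (pos : Int) :
    ws.foldl (fun acc w => acc ++ [PySem.List.pyGetD acc (-1) 0 + PySem.Str.len w]) (a ++ [pos])
      = a ++ bl pos ws := by
  induction ws generalizing a pos with
  | nil => simp [bl]
  | cons w ws ih =>
    simp only [List.foldl_cons, PySem.List.pyGetD_neg_one_append_singleton]
    rw [ih (a ++ [pos]) (pos + PySem.Str.len w)]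
    simp [bl]

theorem bl_cons (pos : Int) (ws : List String) : ∃ t, bl pos ws = pos :: t := by
  cases ws <;> simp [bl]

theorem zip_bl (ws : List String) (pos : Int) :
    ((bl pos ws).dropLast).zip ((bl pos ws).tail) = altSpans ws pos := by
  induction ws generalizing pos with
  | nil => simp [bl, altSpans]
  | cons w ws ih =>
    obtain ⟨t, ht⟩ := bl_cons (pos + PySem.Str.len w) ws
    have h2 := ih (pos + PySem.Str.len w)
    rw [ht] at h2
    simp only [List.tail_cons] at h2
    simp only [bl, altSpans, ht, List.tail_cons]
    rw [List.dropLast_cons₂, List.zip_cons_cons, h2]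

theorem len_nonneg' (w : String) : 0 ≤ PySem.Str.len w := by
  simp [PySem.Str.len_eq]

theorem altSpans_bounds (ws : List String) (pos : Int) :
    ∀ x ∈ altSpans ws pos, pos ≤ x.1 ∧ x.1 ≤ x.2 := by
  induction ws generalizing pos with
  | nil => simp [altSpans]
  | cons w ws ih =>
    intro x hx
    simp only [altSpans, List.mem_cons] at hx
    rcases hx with rfl | hx
    · exact ⟨le_refl _, by have := len_nonneg' w; omega⟩
    · have := ih (pos + PySem.Str.len w) x hx
      have := len_nonneg' w
      omega

theorem altSpans_sorted (ws : List String) (pos : Int) :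
    (altSpans ws pos).Pairwise lexLe := by
  induction ws generalizing pos with
  | nil => simp [altSpans]
  | cons w ws ih =>
    simp only [altSpans, List.pairwise_cons]
    refine ⟨?_, ih _⟩
    intro x hx
    have hb := altSpans_bounds ws (pos + PySem.Str.len w) x hx
    have hl := len_nonneg' w
    simp only [lexLe]
    omega

theorem altAdvance_sublist (p : Int × Int) (pp : List (Int × Int)) :
    (altAdvance p pp).Sublist pp := by
  induction pp with
  | nil => simp [altAdvance]
  | cons q rest ih =>
    simp only [altAdvance]
    split
    · exact ih.trans (List.sublist_cons_self q rest)
    · exact List.Sublist.refl _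

theorem altAdvance_head (p : Int × Int) (pp : List (Int × Int)) (q : Int × Int)
    (rest : List (Int × Int)) (h : altAdvance p pp = q :: rest) : pairLt q p = false := by
  induction pp with
  | nil => simp [altAdvance] at h
  | cons r pr ih =>
    simp only [altAdvance] at h
    split at h
    · exact ih h
    · next hlt => cases h; exact Bool.eq_false_iff.mpr hlt

theorem mem_altAdvance (p : Int × Int) (pp : List (Int × Int)) (x : Int × Int)
    (hx : lexLe p x) : x ∈ altAdvance p pp ↔ x ∈ pp := by
  induction pp with
  | nil => simp [altAdvance]
  | cons q rest ih =>
    simp only [altAdvance]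
    split
    · next hlt =>
      rw [ih]
      simp only [List.mem_cons]
      constructor
      · exact Or.inr
      · rintro (rfl | h)
        · exact absurd hx ((pairLt_iff _ _).mp hlt)
        · exact h
    · exact Iff.rfl

theorem altLoop_eq (rp : List (Int × Int)) (pp : List (Int × Int)) (c : Int)
    (hpp : pp.Pairwise lexLe) (hrp : rp.Pairwise lexLe) :
    altLoop rp pp c = c + (rp.countP (fun x => decide (x ∈ pp)) : Int) := by
  induction rp generalizing pp c with
  | nil => simp [altLoop]
  | cons p rp ih =>
    have hrp' := (List.pairwise_cons.mp hrp).2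
    have hple : ∀ x ∈ rp, lexLe p x := (List.pairwise_cons.mp hrp).1
    set pp' := altAdvance p pp with hpp'def
    have hsub := altAdvance_sublist p pp
    have hpp'sorted : pp'.Pairwise lexLe := hpp.sublist hsub
    have hmem : ∀ x, lexLe p x → (x ∈ pp' ↔ x ∈ pp) := fun x hx => mem_altAdvance p pp x hx
    have hcount : rp.countP (fun x => decide (x ∈ pp')) = rp.countP (fun x => decide (x ∈ pp)) := by
      apply List.countP_congr
      intro x hx
      simp [hmem x (hple x hx)]
    cases hcase : pp' with
    | nil =>
      have hpnot : p ∉ pp := by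
        rw [← hmem p (lexLe_refl p), hcase]; simp
      simp only [altLoop, ← hpp'def, hcase]
      rw [ih [] c (by simp) hrp']
      have : rp.countP (fun x => decide (x ∈ ([] : List (Int × Int)))) = 0 := by
        simp
      rw [this]
      have hcount0 : (p :: rp).countP (fun x => decide (x ∈ pp)) = rp.countP (fun x => decide (x ∈ pp)) := by
        simp [hpnot]
      rw [hcount0]
      have : rp.countP (fun x => decide (x ∈ pp)) = rp.countP (fun x => decide (x ∈ pp')) := hcount.symm
      rw [this, hcase]
      simp
    | cons q rest =>
      have hiff : q = p ↔ p ∈ pp := by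
        constructor
        · rintro rfl
          rw [← hmem q (lexLe_refl q), hcase]; simp
        · intro hp
          have hp' : p ∈ pp' := (hmem p (lexLe_refl p)).mpr hp
          rw [hcase] at hp'
          have hhead := altAdvance_head p pp q rest (by rw [← hpp'def, hcase])
          have hqle : lexLe p q := by
            by_contra hc
            have : pairLt q p = true := (pairLt_iff q p).mpr hc
            rw [hhead] at this
            exact Bool.false_ne_true this
          rcases List.mem_cons.mp hp' with rfl | hprest
          · rfl
          · have hqp : lexLe q p := by
              rw [hcase] at hpp'sorted
              exact (List.pairwise_cons.mp hpp'sorted).1 p hprest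
            exact lexLe_antisymm hqp hqle
      simp only [altLoop, ← hpp'def, hcase]
      rw [ih (q :: rest) _ (by rw [← hcase]; exact hpp'sorted) hrp']
      rw [← hcase, hcount]
      by_cases hq : q = p
      · simp only [if_pos hq]
        have hp : p ∈ pp := hiff.mp hq
        simp [hp]
        ring
      · simp only [if_neg hq]
        have hp : p ∉ pp := fun h => hq (hiff.mpr h)
        simp [hp]

-- A-side: express A's counter as a countP over the zipped spans
theorem cal_count_eq (real_res pred_res : List String) :
    cal_count real_res pred_res =
      ((real_res.length : Int), (pred_res.length : Int),
        ((altSpans real_res 0).countP (fun x => decide (x ∈ altSpans pred_res 0)) : Int)) := by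
  have hr : real_res.foldl (fun acc w => acc ++ [PySem.List.pyGetD acc (-1) 0 + PySem.Str.len w]) [0] = bl 0 real_res := by
    simpa using foldl_eq_bl real_res [] 0
  have hp : pred_res.foldl (fun acc w => acc ++ [PySem.List.pyGetD acc (-1) 0 + PySem.Str.len w]) [0] = bl 0 pred_res := by
    simpa using foldl_eq_bl pred_res [] 0
  unfold cal_count
  simp only [hr, hp, PySem.List.slice_to_neg_one, PySem.List.slice_from_one, zip_bl,
    PySem.List.foldl_if_add_one]
  have hc : (PySem.Set.ofList (altSpans pred_res 0)).contains
      = (fun x : Int × Int => decide (x ∈ altSpans pred_res 0)) := by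
    funext x
    simp [PySem.Set.mem_ofList]
  rw [hc]
  simp

theorem cal_count_alt_eq (real_res pred_res : List String) :
    cal_count_alt real_res pred_res =
      ((real_res.length : Int), (pred_res.length : Int),
        ((altSpans real_res 0).countP (fun x => decide (x ∈ altSpans pred_res 0)) : Int)) := by
  unfold cal_count_alt
  simp only
  rw [altLoop_eq _ _ _ (altSpans_sorted _ _) (altSpans_sorted _ _)]
  simp

-- ===== VERDICT (by name: the statement is the Claim_ definition above) =====
theorem cal_count_spec : Claim_equal_cal_count := by
  intro real_res pred_res _
  unfold Spec_cal_count
  rw [cal_count_eq, cal_count_alt_eq]
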